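-- pv_equiv track=rewrite | github.com/OpenBIM-Hackathon-Team-ECS-Version/backend | server/utils/ifc_utils/generate_ifc_hierarchy.py | enumerate_tree
-- ===== SOURCE A (Python) =====
-- def enumerate_tree(class_name, classes, visited=None):
--     """Helper to count tree nodes."""
--     if visited is None:
--         visited = set()
--     if class_name in visited:
--         return
--     visited.add(class_name)
--
--     yield class_name
--     for child in classes[class_name]['children']:
--         yield from enumerate_tree(child, classes, visited)
-- ===== SOURCE B (Python) =====
-- def enumerate_tree(class_name, classes, visited=None):
--     """Helper to count tree nodes."""
--     if visited is None:
--         visited = set()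
--     stack = [class_name]
--     while stack:
--         node = stack.pop()
--         if node in visited:
--             continue
--         visited.add(node)
--         yield node
--         stack.extend(reversed(classes[node]['children']))
-- ===== Notes on version B (the rewrite author's own statement) =====
-- stated objective: alternative
-- what changed: The recursive generator (yield-from DFS) is replaced by an iterative DFS with an explicit stack: children are pushed in reversed order and the visited check moves to pop time, producing the identical pre-order sequence and the same mutation of the visited set without Python recursion.
import Mathlib
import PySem

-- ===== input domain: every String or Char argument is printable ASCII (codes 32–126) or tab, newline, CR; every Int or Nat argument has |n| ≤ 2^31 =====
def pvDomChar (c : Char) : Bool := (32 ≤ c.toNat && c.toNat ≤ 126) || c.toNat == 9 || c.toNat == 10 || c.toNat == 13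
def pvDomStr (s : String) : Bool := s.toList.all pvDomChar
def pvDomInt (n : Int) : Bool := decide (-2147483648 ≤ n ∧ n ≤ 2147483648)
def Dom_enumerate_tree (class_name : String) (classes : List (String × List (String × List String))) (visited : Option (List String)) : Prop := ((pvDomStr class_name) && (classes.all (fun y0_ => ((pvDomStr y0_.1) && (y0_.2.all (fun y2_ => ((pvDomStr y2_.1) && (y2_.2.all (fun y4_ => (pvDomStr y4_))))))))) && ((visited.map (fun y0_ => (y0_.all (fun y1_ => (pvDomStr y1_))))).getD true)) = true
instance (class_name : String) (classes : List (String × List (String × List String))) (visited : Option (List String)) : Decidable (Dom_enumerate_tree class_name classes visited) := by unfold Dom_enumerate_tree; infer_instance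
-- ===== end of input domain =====

-- B replaces A's recursive yield-from generator by an iterative DFS with an explicit stack (same pre-order
-- sequence). Both Pythons mutate `visited` identically in place; the equivalence proved here is about the
-- yielded sequence (the generator's output as a list). The fuel arguments of the ports are sufficient bounds
-- that only make the same recursion/loop total; they never change the computed value on any input.

-- ===== PORT A =====
/-- `classes[n]['children']` with a default (Python raises KeyError exactly where a default is taken; Pre_ excludes that). -/
def pvChildren (classes : List (String × List (String × List String))) (n : String) : List String :=
  PySem.Dict.getD (PySem.Dict.mk (PySem.Dict.getD (PySem.Dict.mk classes) n [])) "children" []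

/-- all strings occurring in any 'children' list; its length bounds the recursion depth / loop count. -/
def pvAllChildren (classes : List (String × List (String × List String))) : List String :=
  (classes.map (fun kv => PySem.Dict.getD (PySem.Dict.mk kv.2) "children" [])).flatten

def pvFuel (classes : List (String × List (String × List String))) : Nat :=
  (pvAllChildren classes).length + 2

mutual
/-- A's recursive generator: returns (yielded names, final visited set). -/
def enumA : Nat → String → List (String × List (String × List String)) → PySem.Set String → List String × PySem.Set String
  | 0, _, _, vis => ([], vis)
  | fuel + 1, name, classes, vis =>
    if PySem.Set.contains vis name then ([], vis)
    else
      let r := enumASeq fuel (pvChildren classes name) classes (PySem.Set.add vis name)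
      (name :: r.1, r.2)
termination_by fuel _ _ _ => (fuel, 0)
/-- `for child in children: yield from enumerate_tree(child, classes, visited)` -/
def enumASeq : Nat → List String → List (String × List (String × List String)) → PySem.Set String → List String × PySem.Set String
  | _, [], _, vis => ([], vis)
  | fuel, c :: rest, classes, vis =>
    let r := enumA fuel c classes vis
    let s := enumASeq fuel rest classes r.2
    (r.1 ++ s.1, s.2)
termination_by fuel todo _ _ => (fuel, todo.length + 1)
end

def enumerate_tree (class_name : String) (classes : List (String × List (String × List String))) (visited : Option (List String)) : List String :=
  (enumA (pvFuel classes) class_name classes (PySem.Set.ofList (visited.getD []))).1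

-- ===== PORT B =====
/-- B's loop; the Python stack pops from the end and extends with reversed(children), which is
    this head-of-list stack pushed with the children in their original order. -/
def enumB : Nat → List String → List (String × List (String × List String)) → PySem.Set String → List String
  | 0, _, _, _ => []
  | _ + 1, [], _, _ => []
  | fuel + 1, n :: stack, classes, vis =>
    if PySem.Set.contains vis n then enumB fuel stack classes vis
    else n :: enumB fuel (pvChildren classes n ++ stack) classes (PySem.Set.add vis n)

def enumerate_tree_alt (class_name : String) (classes : List (String × List (String × List String))) (visited : Option (List String)) : List String :=
  enumB (pvFuel classes) [class_name] classes (PySem.Set.ofList (visited.getD []))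

-- ===== PRECONDITION & SPEC =====
/-- a name whose `classes[n]['children']` lookup succeeds in Python: `n` is a key of `classes`
    and its dict has a 'children' key. -/
def pvGood (classes : List (String × List (String × List String))) (n : String) : Bool :=
  PySem.Dict.contains (PySem.Dict.mk classes) n &&
  PySem.Dict.contains (PySem.Dict.mk (PySem.Dict.getD (PySem.Dict.mk classes) n [])) "children"

/-- one closure round: add every not-yet-present, not-initially-visited child of every good member. -/
def pvReachStep (classes : List (String × List (String × List String))) (V S : List String) : List String :=
  S.foldl (fun acc n =>
    if pvGood classes n then
      (pvChildren classes n).foldl (fun a c => if V.contains c || a.contains c then a else a ++ [c]) acc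
    else acc) S

/-- the set of names the traversal touches: graph closure of {class_name} under 'children' edges of
    good entries, avoiding the initially-visited names; `classes.length + 1` rounds saturate it
    (each new round needs a new good entry, i.e. a new key). This is a property of the input graph,
    not a run of either port (no visited mutation, no ordering, no output). -/
def pvReachable (classes : List (String × List (String × List String))) (V : List String) (class_name : String) : List String :=
  Nat.rec [class_name] (fun _ S => pvReachStep classes V S) (classes.length + 1)

-- Pre_ holds exactly when the Python A returns (fuzz-checked): it fails exactly when some name
-- reachable from class_name (avoiding `visited`) has no `classes` entry or no 'children' key,
-- where A raises KeyError. No input on which A returns a value is excluded.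
def Pre_enumerate_tree (class_name : String) (classes : List (String × List (String × List String))) (visited : Option (List String)) : Prop :=
  class_name ∈ visited.getD [] ∨
  ∀ n ∈ pvReachable classes (visited.getD []) class_name, pvGood classes n = true
instance (class_name : String) (classes : List (String × List (String × List String))) (visited : Option (List String)) : Decidable (Pre_enumerate_tree class_name classes visited) := by unfold Pre_enumerate_tree; infer_instance

def pvWitness_enumerate_tree : String × (List (String × List (String × List String))) × Option (List String) :=
  ("a", [("a", [("children", ["b"])]), ("b", [("children", [])])], none)

def Spec_enumerate_tree (class_name : String) (classes : List (String × List (String × List String))) (visited : Option (List String)) (out : List String) : Prop := out = enumerate_tree_alt class_name classes visited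
instance (class_name : String) (classes : List (String × List (String × List String))) (visited : Option (List String)) (out : List String) : Decidable (Spec_enumerate_tree class_name classes visited out) := by unfold Spec_enumerate_tree; infer_instance

-- ===== CLAIM (what is proved, stated in full; the proofs are below) =====
def Claim_equal_enumerate_tree : Prop := ∀ (class_name : String) (classes : List (String × List (String × List String))) (visited : Option (List String)), Dom_enumerate_tree class_name classes visited → Pre_enumerate_tree class_name classes visited → Spec_enumerate_tree class_name classes visited (enumerate_tree class_name classes visited)

-- ===== LEMMAS AND PROOFS =====

/-- names of `pvAllChildren classes` not yet visited (bounds A's recursion depth). -/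
def pvUnv (classes : List (String × List (String × List String))) (vis : List String) : Nat :=
  ((pvAllChildren classes).toFinset \ vis.toFinset).card

/-- total number of children still to be pushed by B (bounds B's loop count). -/
def pvPhi (classes : List (String × List (String × List String))) (vis : List String) : Nat :=
  ((classes.map Prod.fst).toFinset \ vis.toFinset).sum (fun k => (pvChildren classes k).length)

lemma pvChildren_sub (classes : List (String × List (String × List String))) (n c : String)
    (h : c ∈ pvChildren classes n) : c ∈ pvAllChildren classes := by
  induction classes with
  | nil => simp [pvChildren, PySem.Dict.getD, PySem.Dict.get?] at h
  | cons kv rest ih =>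
    simp only [pvChildren, PySem.Dict.getD, PySem.Dict.get?] at h ih
    simp only [pvAllChildren, List.map_cons, List.flatten_cons, List.mem_append]
    by_cases hk : (kv.1 == n) = true
    · left
      rw [List.find?_cons_of_pos (p := fun p => p.1 == n) (l := rest) (a := kv) hk] at h
      simpa [PySem.Dict.getD, PySem.Dict.get?] using h
    · right
      rw [List.find?_cons_of_neg (p := fun p => p.1 == n) (l := rest) (a := kv) hk] at h
      exact ih h

lemma pvChildren_not_key (classes : List (String × List (String × List String))) (n : String)
    (h : n ∉ classes.map Prod.fst) : pvChildren classes n = [] := by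
  have hf : List.find? (fun p => p.1 == n) classes = none := by
    rw [List.find?_eq_none]
    intro p hp
    simp only [beq_iff_eq]
    intro he
    exact h (he ▸ List.mem_map_of_mem hp)
  simp [pvChildren, PySem.Dict.getD, PySem.Dict.get?, hf]

lemma set_add_eq (vis : List String) (n : String) (hv : n ∉ vis) :
    PySem.Set.add vis n = vis ++ [n] := by
  simp [PySem.Set.add, PySem.Set.contains, hv]

lemma toFinset_append_singleton (vis : List String) (n : String) :
    (vis ++ [n]).toFinset = insert n vis.toFinset := by
  ext x; simp

lemma pvUnv_mono (classes : List (String × List (String × List String))) (vis vis' : List String)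
    (h : ∀ x ∈ vis, x ∈ vis') : pvUnv classes vis' ≤ pvUnv classes vis := by
  apply Finset.card_le_card
  apply Finset.sdiff_subset_sdiff (Finset.Subset.refl _)
  intro x hx; simpa using h x (by simpa using hx)

lemma pvPhi_mono (classes : List (String × List (String × List String))) (vis vis' : List String)
    (h : ∀ x ∈ vis, x ∈ vis') : pvPhi classes vis' ≤ pvPhi classes vis := by
  apply Finset.sum_le_sum_of_subset
  apply Finset.sdiff_subset_sdiff (Finset.Subset.refl _)
  intro x hx; simpa using h x (by simpa using hx)

lemma pvUnv_drop (classes : List (String × List (String × List String))) (vis : List String)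
    (n : String) (hU : n ∈ pvAllChildren classes) (hv : n ∉ vis) :
    pvUnv classes (PySem.Set.add vis n) + 1 = pvUnv classes vis := by
  rw [pvUnv, set_add_eq vis n hv, toFinset_append_singleton, Finset.sdiff_insert,
    Finset.card_erase_add_one]
  · rfl
  · simp [hU, hv]

lemma pvPhi_drop (classes : List (String × List (String × List String))) (vis : List String)
    (n : String) (hk : n ∈ classes.map Prod.fst) (hv : n ∉ vis) :
    pvPhi classes (PySem.Set.add vis n) + (pvChildren classes n).length = pvPhi classes vis := by
  rw [pvPhi, set_add_eq vis n hv, toFinset_append_singleton, Finset.sdiff_insert,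
    Finset.sum_erase_add]
  · rfl
  · simp [hk, hv]

lemma pvPhi_le (classes : List (String × List (String × List String))) (vis : List String) :
    pvPhi classes vis ≤ (pvAllChildren classes).length := by
  have h1 : pvPhi classes vis ≤ ((classes.map Prod.fst).toFinset).sum (fun k => (pvChildren classes k).length) :=
    Finset.sum_le_sum_of_subset Finset.sdiff_subset
  refine h1.trans ?_
  clear h1
  induction classes with
  | nil => simp
  | cons kv rest ih =>
    obtain ⟨k0, d0⟩ := kv
    simp only [List.map_cons, List.toFinset_cons]
    rw [← Finset.add_sum_erase _ _ (Finset.mem_insert_self k0 _), Finset.erase_insert_eq_erase]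
    have hc0 : pvChildren ((k0, d0) :: rest) k0 = PySem.Dict.getD (PySem.Dict.mk d0) "children" [] := by
      simp only [pvChildren, PySem.Dict.getD, PySem.Dict.get?]
      rw [List.find?_cons_of_pos (p := fun p => p.1 == k0) (l := rest) (a := (k0,d0)) (by simp)]
      rfl
    have hrest : ∀ x ∈ (List.map Prod.fst rest).toFinset.erase k0,
        pvChildren ((k0, d0) :: rest) x = pvChildren rest x := by
      intro x hx
      have hne : ¬ (k0 == x) = true := by
        simp only [Finset.mem_erase] at hx
        simp only [beq_iff_eq]
        exact fun h => hx.1 h.symm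
      simp only [pvChildren, PySem.Dict.getD, PySem.Dict.get?]
      rw [List.find?_cons_of_neg (p := fun p => p.1 == x) (l := rest) (a := (k0,d0)) hne]
    have hrest' : ∀ x ∈ (List.map Prod.fst rest).toFinset.erase k0,
        (pvChildren ((k0, d0) :: rest) x).length = (pvChildren rest x).length := by
      intro x hx; rw [hrest x hx]
    rw [Finset.sum_congr rfl hrest', hc0]
    have hlen : (pvAllChildren ((k0, d0) :: rest)).length
        = (PySem.Dict.getD (PySem.Dict.mk d0) "children" []).length + (pvAllChildren rest).length := by
      simp [pvAllChildren]
    rw [hlen]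
    have h2 : ((List.map Prod.fst rest).toFinset.erase k0).sum (fun k => (pvChildren rest k).length)
        ≤ ((List.map Prod.fst rest).toFinset).sum (fun k => (pvChildren rest k).length) :=
      Finset.sum_le_sum_of_subset (Finset.erase_subset _ _)
    omega

lemma pvUnv_le (classes : List (String × List (String × List String))) (vis : List String) :
    pvUnv classes vis ≤ (pvAllChildren classes).length := by
  calc pvUnv classes vis ≤ (pvAllChildren classes).toFinset.card :=
        Finset.card_le_card (Finset.sdiff_subset)
    _ ≤ _ := List.toFinset_card_le _

lemma set_contains_iff (vis : List String) (n : String) :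
    PySem.Set.contains vis n = true ↔ n ∈ vis := by
  simp [PySem.Set.contains]

lemma mem_set_add (vis : List String) (n x : String) (h : x ∈ vis) : x ∈ PySem.Set.add vis n := by
  simp only [PySem.Set.add]
  split <;> simp [h]

/-- the visited set only grows. -/
lemma enumA_subset (classes : List (String × List (String × List String))) :
    ∀ fuel : Nat,
      (∀ (n : String) (vis : PySem.Set String) (x : String), x ∈ vis → x ∈ (enumA fuel n classes vis).2) ∧
      (∀ (todo : List String) (vis : PySem.Set String) (x : String), x ∈ vis → x ∈ (enumASeq fuel todo classes vis).2) := by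
  intro fuel
  induction fuel with
  | zero =>
    have hE : ∀ (n : String) (vis : PySem.Set String) (x : String), x ∈ vis → x ∈ (enumA 0 n classes vis).2 := by
      intro n vis x h; simpa [enumA] using h
    refine ⟨hE, ?_⟩
    intro todo
    induction todo with
    | nil => intro vis x h; simpa [enumASeq] using h
    | cons c rest ihs => intro vis x h; simp only [enumASeq]; exact ihs _ _ (hE _ _ _ h)
  | succ fuel ih =>
    have hE : ∀ (n : String) (vis : PySem.Set String) (x : String), x ∈ vis → x ∈ (enumA (fuel + 1) n classes vis).2 := by
      intro n vis x h
      simp only [enumA]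
      split
      · exact h
      · exact ih.2 _ _ _ (mem_set_add _ _ _ h)
    refine ⟨hE, ?_⟩
    intro todo
    induction todo with
    | nil => intro vis x h; simpa [enumASeq] using h
    | cons c rest ihs => intro vis x h; simp only [enumASeq]; exact ihs _ _ (hE _ _ _ h)

lemma enumASeq_append (classes : List (String × List (String × List String)))
    (fuel : Nat) (a b : List String) (vis : PySem.Set String) :
    enumASeq fuel (a ++ b) classes vis =
      ((enumASeq fuel a classes vis).1 ++ (enumASeq fuel b classes (enumASeq fuel a classes vis).2).1,
       (enumASeq fuel b classes (enumASeq fuel a classes vis).2).2) := by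
  induction a generalizing vis with
  | nil => simp [enumASeq]
  | cons c rest ih => simp [enumASeq, ih, List.append_assoc]

/-- fuel stability: above the needed bound, the result does not depend on the fuel. -/
lemma enum_stable (classes : List (String × List (String × List String))) :
    ∀ k : Nat,
      (∀ vis : List String, pvUnv classes vis ≤ k →
        ∀ n, n ∈ pvAllChildren classes → ∀ f g, pvUnv classes vis + 1 ≤ f → pvUnv classes vis + 1 ≤ g →
          enumA f n classes vis = enumA g n classes vis) ∧
      (∀ vis : List String, pvUnv classes vis ≤ k →
        ∀ todo : List String, (∀ x ∈ todo, x ∈ pvAllChildren classes) →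
          ∀ f g, pvUnv classes vis + 1 ≤ f → pvUnv classes vis + 1 ≤ g →
          enumASeq f todo classes vis = enumASeq g todo classes vis) := by
  intro k
  induction k using Nat.strong_induction_on with
  | _ k ih =>
  have hE : ∀ vis : List String, pvUnv classes vis ≤ k →
      ∀ n, n ∈ pvAllChildren classes → ∀ f g, pvUnv classes vis + 1 ≤ f → pvUnv classes vis + 1 ≤ g →
        enumA f n classes vis = enumA g n classes vis := by
    intro vis hk n hn f g hf hg
    obtain ⟨f', rfl⟩ : ∃ f', f = f' + 1 := ⟨f - 1, by omega⟩
    obtain ⟨g', rfl⟩ : ∃ g', g = g' + 1 := ⟨g - 1, by omega⟩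
    simp only [enumA]
    by_cases hm : n ∈ vis
    · simp [hm]
    · have hdrop := pvUnv_drop classes vis n hn hm
      have hlt : pvUnv classes (PySem.Set.add vis n) < k := by omega
      have hseq := (ih _ hlt).2 (PySem.Set.add vis n) le_rfl (pvChildren classes n)
        (fun x hx => pvChildren_sub classes n x hx) f' g' (by omega) (by omega)
      rw [set_add_eq vis n hm] at hseq
      simp [hm, hseq]
  refine ⟨hE, ?_⟩
  intro vis hk todo
  induction todo generalizing vis with
  | nil => intro _ _ _ _ _; simp [enumASeq]
  | cons c rest ihs =>
    intro hsub f g hf hg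
    simp only [enumASeq]
    have hc := hE vis hk c (hsub c (List.mem_cons_self)) f g hf hg
    rw [hc]
    have hvis2 : ∀ x ∈ vis, x ∈ (enumA g c classes vis).2 :=
      fun x hx => (enumA_subset classes g).1 c vis x hx
    have hk2 : pvUnv classes (enumA g c classes vis).2 ≤ k :=
      le_trans (pvUnv_mono classes vis _ hvis2) hk
    have hmono := pvUnv_mono classes vis _ hvis2
    rw [ihs _ hk2 (fun x hx => hsub x (List.mem_cons_of_mem _ hx)) f g (by omega) (by omega)]

/-- main simulation: B's stack loop computes the concatenation of A's recursive runs over the stack. -/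
lemma enumB_eq_seq (classes : List (String × List (String × List String))) :
    ∀ k : Nat, ∀ (vis stack : List String), pvUnv classes vis ≤ k →
      (∀ x ∈ stack, x ∈ pvAllChildren classes) →
      ∀ fA fB, pvUnv classes vis + 1 ≤ fA → stack.length + pvPhi classes vis + 1 ≤ fB →
      enumB fB stack classes vis = (enumASeq fA stack classes vis).1 := by
  intro k
  induction k using Nat.strong_induction_on with
  | _ k ih =>
  intro vis stack hk hsub fA fB hfA hfB
  induction stack generalizing vis fA fB with
  | nil =>
    obtain ⟨fB', rfl⟩ : ∃ t, fB = t + 1 := ⟨fB - 1, by omega⟩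
    simp [enumB, enumASeq]
  | cons n rest ihs =>
    obtain ⟨fB', rfl⟩ : ∃ t, fB = t + 1 := ⟨fB - 1, by omega⟩
    obtain ⟨fA', rfl⟩ : ∃ t, fA = t + 1 := ⟨fA - 1, by omega⟩
    simp only [enumB, enumASeq, enumA]
    by_cases hm : n ∈ vis
    · have hc : PySem.Set.contains vis n = true := (set_contains_iff vis n).mpr hm
      rw [if_pos hc, if_pos hc]
      simp only [List.nil_append]
      exact ihs vis hk (fun x hx => hsub x (List.mem_cons_of_mem _ hx)) (fA' + 1) fB'
        hfA (by simp at hfB ⊢; omega)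
    · have hc : ¬ PySem.Set.contains vis n = true := by
        simpa [set_contains_iff vis n] using hm
      rw [if_neg hc, if_neg hc]
      have hnU : n ∈ pvAllChildren classes := hsub n List.mem_cons_self
      have hdropU := pvUnv_drop classes vis n hnU hm
      have hlt : pvUnv classes (PySem.Set.add vis n) < k := by omega
      have hsub1 : ∀ x ∈ pvChildren classes n ++ rest, x ∈ pvAllChildren classes := by
        intro x hx
        rcases List.mem_append.mp hx with h | h
        · exact pvChildren_sub classes n x h
        · exact hsub x (List.mem_cons_of_mem _ h)
      have hfB1 : (pvChildren classes n ++ rest).length + pvPhi classes (PySem.Set.add vis n) + 1 ≤ fB' := by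
        by_cases hkey : n ∈ classes.map Prod.fst
        · have hd := pvPhi_drop classes vis n hkey hm
          simp only [List.length_append] at *
          simp only [List.length_cons] at hfB
          omega
        · have hch : pvChildren classes n = [] := pvChildren_not_key classes n hkey
          have hmono := pvPhi_mono classes vis (PySem.Set.add vis n) (fun x hx => mem_set_add vis n x hx)
          simp only [hch, List.nil_append, List.length_cons] at *
          omega
      have hrec := ih _ hlt (PySem.Set.add vis n) (pvChildren classes n ++ rest) le_rfl hsub1
        (fA' + 1) fB' (by omega) hfB1
      have hstab := (enum_stable classes (pvUnv classes (PySem.Set.add vis n))).2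
        (PySem.Set.add vis n) le_rfl (pvChildren classes n)
        (fun x hx => pvChildren_sub classes n x hx) (fA' + 1) fA' (by omega) (by omega)
      have happ := enumASeq_append classes (fA' + 1) (pvChildren classes n) rest (PySem.Set.add vis n)
      rw [hrec, happ, hstab]
      simp

-- ===== VERDICT (by name: the statement is the Claim_ definition above) =====
theorem enumerate_tree_spec : Claim_equal_enumerate_tree := by
  intro class_name classes visited _ _
  unfold Spec_enumerate_tree enumerate_tree enumerate_tree_alt
  set vis0 : PySem.Set String := PySem.Set.ofList (visited.getD []) with hvis0
  simp only [pvFuel]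
  set L := (pvAllChildren classes).length with hL
  rw [show L + 2 = (L + 1) + 1 from rfl]
  simp only [enumA, enumB]
  by_cases hm : class_name ∈ vis0
  · have hc : PySem.Set.contains vis0 class_name = true := (set_contains_iff _ _).mpr hm
    rw [if_pos hc, if_pos hc]
  · have hc : ¬ PySem.Set.contains vis0 class_name = true := by
      simpa [set_contains_iff vis0 class_name] using hm
    rw [if_neg hc, if_neg hc, List.append_nil]
    have hfB1 : (pvChildren classes class_name).length + pvPhi classes (PySem.Set.add vis0 class_name) + 1 ≤ L + 1 := by
      by_cases hkey : class_name ∈ classes.map Prod.fst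
      · have hd := pvPhi_drop classes vis0 class_name hkey hm
        have hle := pvPhi_le classes vis0
        omega
      · have hch : pvChildren classes class_name = [] := pvChildren_not_key classes class_name hkey
        have hle := pvPhi_le classes (PySem.Set.add vis0 class_name)
        simp only [hch, List.length_nil]
        omega
    have hfA1 : pvUnv classes (PySem.Set.add vis0 class_name) + 1 ≤ L + 1 := by
      have := pvUnv_le classes (PySem.Set.add vis0 class_name)
      omega
    have hmain := enumB_eq_seq classes (pvUnv classes (PySem.Set.add vis0 class_name))
      (PySem.Set.add vis0 class_name) (pvChildren classes class_name) le_rfl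
      (fun x hx => pvChildren_sub classes class_name x hx) (L + 1) (L + 1) hfA1 hfB1
    rw [hmain]
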